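-- pv_equiv track=rewrite | github.com/yluchka/main | years_dict.py | films_locations
-- ===== SOURCE A (Python) =====
-- def films_locations(year_dict: dict, year: str) -> dict:
--     """
--     returns a dictionary with keys with location and values with movie name.
--     Works with appropriately specified year
--     """
--     film_location = {}
--     for i in range(len(year_dict[year])):
--         if year_dict[year][i][0] not in film_location:
--             film_location[year_dict[year][i][0]] = [year_dict[year][i][1]]
--         else:
--             film_location[year_dict[year][i][0]].append(year_dict[year][i][1])
--     return film_location
-- ===== SOURCE B (Python) =====
-- def films_locations(year_dict: dict, year: str) -> dict:
--     """
--     returns a dictionary with keys with location and values with movie name.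
--     Works with appropriately specified year
--     """
--     films = year_dict[year]
--     seen = []
--     for loc, _name in films:
--         if loc not in seen:
--             seen.append(loc)
--     return {loc: [name for l, name in films if l == loc] for loc in seen}
-- ===== Notes on version B (the rewrite author's own statement) =====
-- stated objective: alternative
-- what changed: Replaces A's index loop that builds a dict with membership tests and in-place appends by a two-phase decomposition: first collect the distinct locations in first-occurrence order, then build the result with one filtering comprehension per location.
import Mathlib
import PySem

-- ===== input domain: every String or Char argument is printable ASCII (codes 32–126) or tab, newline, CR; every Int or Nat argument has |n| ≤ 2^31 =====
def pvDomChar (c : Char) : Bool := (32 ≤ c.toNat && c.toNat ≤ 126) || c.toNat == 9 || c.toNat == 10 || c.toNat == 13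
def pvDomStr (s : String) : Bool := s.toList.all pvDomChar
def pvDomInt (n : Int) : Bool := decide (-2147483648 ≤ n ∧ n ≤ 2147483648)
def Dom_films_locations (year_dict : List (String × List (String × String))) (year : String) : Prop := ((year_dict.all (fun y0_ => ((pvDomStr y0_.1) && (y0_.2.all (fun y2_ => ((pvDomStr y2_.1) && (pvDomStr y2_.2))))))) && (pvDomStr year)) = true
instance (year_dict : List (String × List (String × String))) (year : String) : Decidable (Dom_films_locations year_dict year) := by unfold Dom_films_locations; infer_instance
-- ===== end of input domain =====

-- B groups by location via an explicit first-occurrence key list plus a per-key filter pass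
-- (alternative decomposition; A's single dict-building index loop disappears).


-- ===== PORT A =====
-- one iteration of A's loop body (the not-in / append branches, in A's order)
def filmsAStep (d : PySem.Dict String (List String)) (p : String × String) :
    PySem.Dict String (List String) :=
  if d.contains p.1 = false then d.insert p.1 [p.2]
  else d.insert p.1 (d.getD p.1 [] ++ [p.2])

def films_locations (year_dict : List (String × List (String × String))) (year : String) : List (String × List String) :=
  match year_dict.lookup year with   -- year_dict[year]; none = KeyError, excluded by Pre_
  | none => []
  | some films =>
    ((PySem.List.pyRange 0 (PySem.List.len films) 1).foldl
      (fun d i => filmsAStep d (PySem.List.pyGetD films i ("", ""))) PySem.Dict.empty).items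

-- ===== PORT B =====
def films_locations_alt (year_dict : List (String × List (String × String))) (year : String) : List (String × List String) :=
  match year_dict.lookup year with   -- year_dict[year]; none = KeyError, excluded by Pre_
  | none => []
  | some films =>
    let seen := films.foldl (fun s p => if s.contains p.1 then s else s ++ [p.1]) []
    seen.map (fun loc => (loc, (films.filter (fun p => p.1 == loc)).map (·.2)))

-- ===== PRECONDITION & SPEC =====
-- Pre_: the year must be a key of year_dict (otherwise Python A raises KeyError).
def Pre_films_locations (year_dict : List (String × List (String × String))) (year : String) : Prop :=
  (year_dict.lookup year).isSome = true
instance (year_dict : List (String × List (String × String))) (year : String) : Decidable (Pre_films_locations year_dict year) := by unfold Pre_films_locations; infer_instance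

def pvWitness_films_locations : (List (String × List (String × String))) × String :=
  ([("2010", [("NY", "a"), ("LA", "b"), ("NY", "c")])], "2010")

def Spec_films_locations (year_dict : List (String × List (String × String))) (year : String) (out : List (String × List String)) : Prop := out = films_locations_alt year_dict year
instance (year_dict : List (String × List (String × String))) (year : String) (out : List (String × List String)) : Decidable (Spec_films_locations year_dict year out) := by unfold Spec_films_locations; infer_instance

-- ===== CLAIM (what is proved, stated in full; the proofs are below) =====
def Claim_equal_films_locations : Prop := ∀ (year_dict : List (String × List (String × String))) (year : String), Dom_films_locations year_dict year → Pre_films_locations year_dict year → Spec_films_locations year_dict year (films_locations year_dict year)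

-- ===== LEMMAS AND PROOFS =====

-- A's loop body is exactly a dict 'modify at the key' step
theorem filmsAStep_eq_modify (d : PySem.Dict String (List String)) (p : String × String) :
    filmsAStep d p = d.modify p.1 [] (· ++ [p.2]) := by
  unfold filmsAStep PySem.Dict.modify
  by_cases h : d.contains p.1 = false
  · rw [PySem.Dict.getD_of_not_contains d [] h]; simp [h]
  · simp [h]

-- the core: A's grouping fold, rendered as items, is B's keylist-then-filter construction
theorem groupFold_items_eq (films : List (String × String)) :
    (films.foldl filmsAStep PySem.Dict.empty).items =
      (films.foldl (fun s p => if s.contains p.1 then s else s ++ [p.1]) []).map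
        (fun loc => (loc, (films.filter (fun p => p.1 == loc)).map (·.2))) := by
  have hfold : films.foldl filmsAStep PySem.Dict.empty =
      films.foldl (fun d p => d.modify p.1 [] (· ++ [p.2])) PySem.Dict.empty := by
    exact PySem.List.foldl_congr_mem films _ _ _ (fun d p _ => filmsAStep_eq_modify d p)
  rw [hfold]
  set D := films.foldl (fun d p => d.modify p.1 [] (· ++ [p.2])) PySem.Dict.empty with hD
  have hnd : D.keys.Nodup := by
    have := PySem.Dict.nodup_keys_foldl_modify_key films (fun p => p.1) []
      (fun _ p v => v ++ [p.2]) PySem.Dict.empty (by simp)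
    simpa [hD] using this
  have hkeys : D.keys = films.foldl (fun s p => if s.contains p.1 then s else s ++ [p.1]) [] := by
    have := PySem.Dict.keys_foldl_modify_key films (fun p => p.1) []
      (fun _ p v => v ++ [p.2]) PySem.Dict.empty
    rw [hD, this, PySem.Dict.keys_empty]
    show List.foldl PySem.Set.add [] (films.map (fun p => p.1)) = _
    rw [List.foldl_map]
    rfl
  have hget : ∀ loc, D.getD loc [] = (films.filter (fun p => p.1 == loc)).map (·.2) := by
    intro loc
    have := PySem.Dict.getD_foldl_modify_append films PySem.Dict.empty loc
    simpa [hD] using this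
  rw [PySem.Dict.items_eq_map_keys D hnd [], hkeys]
  exact List.map_congr_left (fun k _ => by rw [hget k])

-- ===== VERDICT (by name: the statement is the Claim_ definition above) =====
theorem films_locations_spec : Claim_equal_films_locations := by
  intro year_dict year _ _
  unfold Spec_films_locations films_locations films_locations_alt
  cases h : year_dict.lookup year with
  | none => rfl
  | some films =>
    simp only []
    rw [PySem.List.foldl_pyRange_zero_pyGetD films ("", "") filmsAStep PySem.Dict.empty]
    exact groupFold_items_eq films
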